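-- pv_equiv track=rewrite | github.com/alex-s-hong/code_prep | tuSimple/unique_pair_string.py | check_string2
-- ===== SOURCE A (Python) =====
-- from collections import defaultdict
--
-- def check_string2(s):
--     loc = defaultdict(list)
--     dup = []
--     for i, v in enumerate(s):
--
--         if v in loc:
--             dup.append(v)
--         loc[v].append(i)
--
--     if not dup or len(dup) == 1: # len(loc) == len(s): #
--         return True
-- ===== SOURCE B (Python) =====
-- def check_string2(s):
--     if len(s) - len(set(s)) <= 1:
--         return True
-- ===== Notes on version B (the rewrite author's own statement) =====
-- stated objective: simpler
-- what changed: Replaces the per-character dict-and-dup-list tracking loop with the closed form len(s) - len(set(s)) <= 1 (extra occurrences counted arithmetically via the C-level set constructor), preserving the fall-through None on the false case.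
import Mathlib
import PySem

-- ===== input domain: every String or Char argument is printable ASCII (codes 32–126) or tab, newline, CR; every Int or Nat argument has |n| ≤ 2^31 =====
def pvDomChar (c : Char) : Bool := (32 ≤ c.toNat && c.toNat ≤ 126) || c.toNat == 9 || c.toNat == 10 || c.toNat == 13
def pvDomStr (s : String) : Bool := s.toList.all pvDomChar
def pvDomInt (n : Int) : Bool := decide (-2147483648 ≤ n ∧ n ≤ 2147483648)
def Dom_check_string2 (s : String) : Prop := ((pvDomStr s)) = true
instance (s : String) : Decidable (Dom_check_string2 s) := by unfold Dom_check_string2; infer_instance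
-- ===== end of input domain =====

-- ===== PORT A =====
-- B computes len(s) - len(set(s)) <= 1 in closed form instead of A's dict-and-dup-list loop (objective: simpler).
def check_string2 (s : String) : Option Bool :=
  let st := (PySem.List.enumerate s.toList 0).foldl
    (fun (p : PySem.Dict Char (List Int) × List Char) iv =>
      ((p.1).modify iv.2 [] (· ++ [iv.1]),
       if (p.1).contains iv.2 then p.2 ++ [iv.2] else p.2))
    (PySem.Dict.empty, [])
  if st.2 = [] ∨ st.2.length = 1 then some true else none

-- ===== PORT B =====
def check_string2_alt (s : String) : Option Bool :=
  if s.toList.length - (PySem.Set.ofList s.toList).length ≤ 1 then some true else none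

-- ===== PRECONDITION & SPEC =====
def Spec_check_string2 (s : String) (out : Option Bool) : Prop := out = check_string2_alt s
instance (s : String) (out : Option Bool) : Decidable (Spec_check_string2 s out) := by unfold Spec_check_string2; infer_instance

-- ===== CLAIM (what is proved, stated in full; the proofs are below) =====
def Claim_equal_check_string2 : Prop := ∀ (s : String), Dom_check_string2 s → Spec_check_string2 s (check_string2 s)

-- ===== LEMMAS AND PROOFS =====

-- ===== VERDICT (by name: the statement is the Claim_ definition above) =====
-- loop invariant: the dup list's length plus the number of distinct chars after the loop
-- equals the dup length plus distinct count before plus the number of processed chars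
lemma dup_invariant (l : List Char) : ∀ (i : Int) (loc : PySem.Dict Char (List Int)) (dup : List Char),
    loc.keys.Nodup →
    ((PySem.List.enumerate l i).foldl
      (fun (p : PySem.Dict Char (List Int) × List Char) iv =>
        ((p.1).modify iv.2 [] (· ++ [iv.1]),
         if (p.1).contains iv.2 then p.2 ++ [iv.2] else p.2))
      (loc, dup)).2.length + (PySem.Set.update loc.keys l).length
      = dup.length + loc.keys.length + l.length := by
  induction l with
  | nil => intro i loc dup h; simp [PySem.List.enumerate, PySem.Set.update]
  | cons c l ih =>
    intro i loc dup h
    rw [PySem.List.enumerate_cons]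
    simp only [List.foldl_cons]
    by_cases hc : loc.contains c = true
    · have hk : (loc.modify c ([] : List Int) (· ++ [i])).keys = loc.keys := by
        rw [PySem.Dict.keys_modify, PySem.Dict.keys_insert_of_contains _ _ hc]
      have hmem : c ∈ loc.keys := (PySem.Dict.contains_iff_mem_keys (d := loc) (k := c)).1 hc
      have hadd : PySem.Set.add loc.keys c = loc.keys := by
        simp [PySem.Set.add, PySem.Set.contains, hmem]
      have hrec := ih (i + 1) (loc.modify c ([] : List Int) (· ++ [i])) (dup ++ [c]) (hk ▸ h)
      rw [hk] at hrec
      simp only [hc, if_true, PySem.Set.update] at hrec ⊢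
      rw [List.foldl_cons, hadd]
      simp only [List.length_append, List.length_cons, List.length_nil] at hrec ⊢
      omega
    · have hc' : loc.contains c = false := by simpa using hc
      have hk : (loc.modify c ([] : List Int) (· ++ [i])).keys = loc.keys ++ [c] := by
        rw [PySem.Dict.keys_modify, PySem.Dict.keys_insert_of_not_contains _ _ hc']
      have hnm : c ∉ loc.keys := fun hm =>
        absurd ((PySem.Dict.contains_iff_mem_keys (d := loc) (k := c)).2 hm) (by simp [hc'])
      have hadd : PySem.Set.add loc.keys c = loc.keys ++ [c] := by
        simp [PySem.Set.add, PySem.Set.contains, hnm]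
      have hnodup : (loc.keys ++ [c]).Nodup := by
        rw [List.nodup_append]
        exact ⟨h, List.nodup_singleton c, by intro a ha b hb; rw [List.mem_singleton] at hb; subst hb; exact fun e => hnm (e ▸ ha)⟩
      have hrec := ih (i + 1) (loc.modify c ([] : List Int) (· ++ [i])) dup (hk ▸ hnodup)
      rw [hk] at hrec
      simp only [hc', if_false, Bool.false_eq_true, PySem.Set.update] at hrec ⊢
      rw [List.foldl_cons, hadd]
      simp only [List.length_append, List.length_cons, List.length_nil] at hrec ⊢
      omega

lemma dup_length (l : List Char) :
    ((PySem.List.enumerate l 0).foldl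
      (fun (p : PySem.Dict Char (List Int) × List Char) iv =>
        ((p.1).modify iv.2 [] (· ++ [iv.1]),
         if (p.1).contains iv.2 then p.2 ++ [iv.2] else p.2))
      (PySem.Dict.empty, ([] : List Char))).2.length
      + (PySem.Set.ofList l).length = l.length := by
  have h := dup_invariant l 0 PySem.Dict.empty [] (by simp [PySem.Dict.keys_empty])
  simpa [PySem.Dict.keys_empty, PySem.Set.update, PySem.Set.ofList_eq_foldl] using h

theorem check_string2_spec : Claim_equal_check_string2 := by
  intro s _
  unfold Spec_check_string2 check_string2 check_string2_alt
  have h := dup_length s.toList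
  have hle : (PySem.Set.ofList s.toList).length ≤ s.toList.length :=
    PySem.Set.length_ofList_le s.toList
  set dup := ((PySem.List.enumerate s.toList 0).foldl
      (fun (p : PySem.Dict Char (List Int) × List Char) iv =>
        ((p.1).modify iv.2 [] (· ++ [iv.1]),
         if (p.1).contains iv.2 then p.2 ++ [iv.2] else p.2))
      (PySem.Dict.empty, ([] : List Char))).2 with hdup
  by_cases hcond : dup = [] ∨ dup.length = 1
  · have h1 : dup.length ≤ 1 := by
      rcases hcond with h0 | h1
      · simp [h0]
      · omega
    rw [if_pos hcond, if_pos (by omega)]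
  · have h0 : dup.length ≠ 0 := fun hz => hcond (Or.inl (List.length_eq_zero_iff.1 hz))
    have h1 : dup.length ≠ 1 := fun h1 => hcond (Or.inr h1)
    rw [if_neg hcond, if_neg (by omega)]
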